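-- pv_equiv track=rewrite | github.com/kitanoyoru/Labs | LOIS/Lab1/src/checkers/checkers.py | check_disjunction
-- ===== SOURCE A (Python) =====
-- def check_disjunction(formula: str) -> bool:
--     is_open = False
--
--     for ch in formula:
--         if ch == "(":
--             is_open = True
--         if ch == ")":
--             is_open = False
--
--         if ch == "|" and is_open:
--             return False
--
--     return True
-- ===== SOURCE B (Python) =====
-- import re
--
-- _BAD = re.compile(r'\([^()]*\|')
--
-- def check_disjunction(formula: str) -> bool:
--     return _BAD.search(formula) is None
-- ===== Notes on version B (the rewrite author's own statement) =====
-- stated objective: idiomatic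
-- what changed: Replaced the character-by-character state machine carrying an is_open flag with a single regular-expression search for an opening bracket followed by non-bracket characters and then the disjunction symbol.
import Mathlib
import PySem

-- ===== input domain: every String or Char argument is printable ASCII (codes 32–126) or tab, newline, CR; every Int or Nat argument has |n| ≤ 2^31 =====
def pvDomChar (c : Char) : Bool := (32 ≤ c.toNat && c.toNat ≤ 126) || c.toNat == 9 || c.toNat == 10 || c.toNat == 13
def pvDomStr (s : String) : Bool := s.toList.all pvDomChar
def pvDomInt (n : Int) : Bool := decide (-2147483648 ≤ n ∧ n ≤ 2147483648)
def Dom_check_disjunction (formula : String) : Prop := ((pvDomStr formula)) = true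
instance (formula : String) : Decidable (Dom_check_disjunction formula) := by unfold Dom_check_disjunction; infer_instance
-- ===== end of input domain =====

-- B replaces A's explicit is_open state machine with one regex search r'\([^()]*\|' (idiomatic one-liner).

-- ===== PORT A =====
-- loop over the characters carrying the is_open flag; early `return False` = recursion stops with false
def checkDisjLoop : List Char → Bool → Bool
  | [], _ => true
  | ch :: rest, isOpen =>
    let isOpen := if ch = '(' then true else isOpen
    let isOpen := if ch = ')' then false else isOpen
    if ch = '|' ∧ isOpen then false else checkDisjLoop rest isOpen

def check_disjunction (formula : String) : Bool :=
  checkDisjLoop formula.toList false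

-- ===== PORT B =====
-- hand-written matcher for the regex r'\([^()]*\|' (exact: the pattern has no
-- backtracking choice — after '(' it consumes [^()]* greedily, which for this
-- pattern is equivalent to the first-stop scan below), tried at every start
-- position as re.search does.
-- match the suffix after a '(' : skip characters that are not '(' or ')', succeed on '|'
def regexInner : List Char → Bool
  | [] => false
  | c :: rest => if c = '|' then true else if c = '(' ∨ c = ')' then false else regexInner rest

-- re.search: try the pattern at each start position
def regexSearch : List Char → Bool
  | [] => false
  | c :: rest => (c = '(' && regexInner rest) || regexSearch rest

def check_disjunction_alt (formula : String) : Bool :=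
  !(regexSearch formula.toList)

-- ===== PRECONDITION & SPEC =====
def Spec_check_disjunction (formula : String) (out : Bool) : Prop := out = check_disjunction_alt formula
instance (formula : String) (out : Bool) : Decidable (Spec_check_disjunction formula out) := by unfold Spec_check_disjunction; infer_instance

-- ===== CLAIM (what is proved, stated in full; the proofs are below) =====
def Claim_equal_check_disjunction : Prop := ∀ (formula : String), Dom_check_disjunction formula → Spec_check_disjunction formula (check_disjunction formula)

-- ===== LEMMAS AND PROOFS =====

-- Invariant: A's loop returns true iff no match starts anywhere, nor (if the flag is set) inside the current open group.
theorem checkDisjLoop_eq (l : List Char) :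
    ∀ b : Bool, checkDisjLoop l b = !((b && regexInner l) || regexSearch l) := by
  induction l with
  | nil => intro b; simp [checkDisjLoop, regexInner, regexSearch]
  | cons c rest ih =>
    intro b
    by_cases hp : c = '|'
    · subst hp
      cases b <;> simp [checkDisjLoop, regexInner, regexSearch, ih]
    · by_cases ho : c = '('
      · subst ho
        simp [checkDisjLoop, regexInner, regexSearch, ih]
      · by_cases hc : c = ')'
        · subst hc
          simp [checkDisjLoop, regexInner, regexSearch, ih]
        · simp [checkDisjLoop, regexInner, regexSearch, ih, hp, ho, hc]

-- ===== VERDICT (by name: the statement is the Claim_ definition above) =====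
theorem check_disjunction_spec : Claim_equal_check_disjunction := by
  intro formula _
  unfold Spec_check_disjunction check_disjunction check_disjunction_alt
  rw [checkDisjLoop_eq]
  simp
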